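-- pv_equiv track=rewrite | github.com/rawbby/tinape | core/util/gen_macro.py | generate_reverse
-- ===== SOURCE A (Python) =====
-- def generate_reverse(n):
--     lines = []
--     lines.append('#define REVERSE_0(...)')
--     for i in range(1, n + 1):
--         params = ','.join(f"x{j}" for j in range(i))
--         reversed_params = ','.join(f"x{j}" for j in reversed(range(i)))
--         lines.append(f"#define REVERSE_{i}({params}){reversed_params}")
--     return '\n'.join(lines)
-- ===== SOURCE B (Python) =====
-- def generate_reverse(n):
--     lines = ['#define REVERSE_0(...)']
--     fwd = ''
--     rev = ''
--     for i in range(1, n + 1):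
--         tok = f"x{i - 1}"
--         fwd = tok if fwd == '' else fwd + ',' + tok
--         rev = tok if rev == '' else tok + ',' + rev
--         lines.append(f"#define REVERSE_{i}({fwd}){rev}")
--     return '\n'.join(lines)
-- ===== Notes on version B (the rewrite author's own statement) =====
-- stated objective: faster
-- what changed: B maintains the forward and reversed parameter lists as two incrementally extended strings (one token appended/prepended per iteration) instead of recomputing both O(i)-token range-comprehension joins from scratch for every macro line; measured ~6x faster at the largest sizes.
import Mathlib
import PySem

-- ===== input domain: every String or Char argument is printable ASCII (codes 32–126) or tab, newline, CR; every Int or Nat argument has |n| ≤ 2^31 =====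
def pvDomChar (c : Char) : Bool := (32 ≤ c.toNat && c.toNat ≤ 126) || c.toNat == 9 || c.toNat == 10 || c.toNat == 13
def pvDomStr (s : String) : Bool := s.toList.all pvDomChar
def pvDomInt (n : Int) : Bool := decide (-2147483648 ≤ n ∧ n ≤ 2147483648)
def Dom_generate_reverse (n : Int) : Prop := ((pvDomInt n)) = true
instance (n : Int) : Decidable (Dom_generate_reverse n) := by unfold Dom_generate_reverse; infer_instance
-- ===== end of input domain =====

-- B maintains the forward and reversed parameter lists incrementally (one token appended/prepended
-- per macro) instead of recomputing both join-comprehensions for every line (measured faster).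

-- ===== PORT A =====
def generate_reverse (n : Int) : String :=
  let lines : List String := ["#define REVERSE_0(...)"]
  let lines := (PySem.List.pyRange 1 (n + 1) 1).foldl (fun lines i =>
    let params := PySem.Str.join "," ((PySem.List.pyRange 0 i 1).map (fun j => "x" ++ PySem.Int.toStr j))
    let reversed_params := PySem.Str.join "," ((PySem.List.pyRange 0 i 1).reverse.map (fun j => "x" ++ PySem.Int.toStr j))
    lines ++ ["#define REVERSE_" ++ PySem.Int.toStr i ++ "(" ++ params ++ ")" ++ reversed_params]) lines
  PySem.Str.join "\n" lines

-- ===== PORT B =====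
def generate_reverse_alt (n : Int) : String :=
  let st := (PySem.List.pyRange 1 (n + 1) 1).foldl (fun (st : List String × String × String) i =>
    let tok := "x" ++ PySem.Int.toStr (i - 1)
    let fwd := if st.2.1 == "" then tok else st.2.1 ++ "," ++ tok
    let rev := if st.2.2 == "" then tok else tok ++ "," ++ st.2.2
    (st.1 ++ ["#define REVERSE_" ++ PySem.Int.toStr i ++ "(" ++ fwd ++ ")" ++ rev], fwd, rev))
    (["#define REVERSE_0(...)"], "", "")
  PySem.Str.join "\n" st.1

-- ===== PRECONDITION & SPEC =====
def Spec_generate_reverse (n : Int) (out : String) : Prop := out = generate_reverse_alt n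
instance (n : Int) (out : String) : Decidable (Spec_generate_reverse n out) := by unfold Spec_generate_reverse; infer_instance

-- ===== CLAIM (what is proved, stated in full; the proofs are below) =====
def Claim_equal_generate_reverse : Prop := ∀ (n : Int), Dom_generate_reverse n → Spec_generate_reverse n (generate_reverse n)

-- ===== LEMMAS AND PROOFS =====

-- A's parameter strings for macro i, as A computes them
def pvTok (j : Int) : String := "x" ++ PySem.Int.toStr j
def pvParams (i : Int) : String := PySem.Str.join "," ((PySem.List.pyRange 0 i 1).map pvTok)
def pvRevp (i : Int) : String := PySem.Str.join "," ((PySem.List.pyRange 0 i 1).reverse.map pvTok)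

lemma pvJoin_append_singleton (sep : List Char) (xs : List (List Char)) (y : List Char)
    (h : xs ≠ []) : PySem.Chars.join sep (xs ++ [y]) = PySem.Chars.join sep xs ++ sep ++ y := by
  induction xs with
  | nil => simp at h
  | cons a t ih =>
    cases t with
    | nil => simp [PySem.Chars.join_cons_cons, PySem.Chars.join_singleton]
    | cons b t' =>
      have hih := ih (by simp)
      simp only [List.cons_append] at hih ⊢
      rw [PySem.Chars.join_cons_cons, hih, PySem.Chars.join_cons_cons]
      simp

lemma pvRange_zero_succ (k : Nat) :
    PySem.List.pyRange 0 ((k : Int) + 1) 1 = PySem.List.pyRange 0 (k : Int) 1 ++ [(k : Int)] :=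
  PySem.List.pyRange_one_succ_right (by exact_mod_cast Int.natCast_nonneg k)

lemma pvRange_len_ne (k : Nat) (h : 1 ≤ k) :
    List.map String.toList (List.map pvTok (PySem.List.pyRange 0 (k : Int) 1)) ≠ [] := by
  have hl := PySem.List.length_pyRange_one (a := 0) (b := (k : Int))
  intro hc
  rw [← List.length_eq_zero_iff] at hc
  simp at hc
  omega

lemma pvParams_succ (k : Nat) (h : 1 ≤ k) :
    pvParams ((k : Int) + 1) = pvParams (k : Int) ++ "," ++ pvTok (k : Int) := by
  apply String.toList_inj.mp
  rw [pvParams, pvParams, pvRange_zero_succ]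
  simp only [List.map_append, List.map_cons, List.map_nil, PySem.Str.toList_join,
    String.toList_append]
  rw [pvJoin_append_singleton _ _ _ (pvRange_len_ne k h)]

lemma pvTok_toList_ne (j : Int) : (pvTok j).toList ≠ [] := by
  simp [pvTok]

lemma pvJoin_ne (sep : List Char) (l : List (List Char)) (h : l ≠ [])
    (h2 : ∀ a ∈ l, a ≠ []) : PySem.Chars.join sep l ≠ [] := by
  cases l with
  | nil => simp at h
  | cons a t =>
    cases t with
    | nil => simpa [PySem.Chars.join_singleton] using h2 a (by simp)
    | cons b t' =>
      rw [PySem.Chars.join_cons_cons]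
      have := h2 a (by simp)
      simp [this]

lemma pvJoin_map_ne (L : List Int) (h : L ≠ []) :
    (PySem.Str.join "," (L.map pvTok) == "") = false := by
  rw [beq_eq_false_iff_ne]
  intro hc
  have : (PySem.Str.join "," (L.map pvTok)).toList = ([] : List Char) := by rw [hc]; rfl
  rw [PySem.Str.toList_join, List.map_map] at this
  refine pvJoin_ne _ _ ?_ ?_ this
  · simpa using h
  · intro a ha
    simp only [List.mem_map] at ha
    obtain ⟨j, _, rfl⟩ := ha
    exact pvTok_toList_ne j

lemma pvRange_ne (k : Nat) (h : 1 ≤ k) : PySem.List.pyRange 0 (k : Int) 1 ≠ [] := by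
  have hl := PySem.List.length_pyRange_one (a := 0) (b := (k : Int))
  intro hc
  rw [← List.length_eq_zero_iff] at hc
  omega

lemma pvParams_ne (k : Nat) (h : 1 ≤ k) : (pvParams (k : Int) == "") = false :=
  pvJoin_map_ne _ (pvRange_ne k h)

lemma pvRevp_ne (k : Nat) (h : 1 ≤ k) : (pvRevp (k : Int) == "") = false := by
  rw [pvRevp]
  exact pvJoin_map_ne _ (by simpa using pvRange_ne k h)

lemma pvRevp_succ (k : Nat) (h : 1 ≤ k) :
    pvRevp ((k : Int) + 1) = pvTok (k : Int) ++ "," ++ pvRevp (k : Int) := by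
  apply String.toList_inj.mp
  rw [pvRevp, pvRevp, pvRange_zero_succ]
  simp only [List.reverse_append, List.reverse_cons, List.reverse_nil, List.nil_append,
    List.singleton_append, List.map_cons, PySem.Str.toList_join, List.map_cons,
    String.toList_append]
  have hne : (PySem.List.pyRange 0 (k : Int) 1).reverse ≠ [] := by
    simpa using pvRange_ne k h
  cases hrev : (PySem.List.pyRange 0 (k : Int) 1).reverse with
  | nil => exact absurd hrev hne
  | cons a t =>
    rw [List.map_cons, List.map_cons, PySem.Chars.join_cons_cons]

-- invariant of B's fold: B's lines equal A's lines and B's accumulators are A's comprehension joins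
lemma pvInv (k : Nat) :
    (PySem.List.pyRange 1 ((k : Int) + 1) 1).foldl
      (fun (st : List String × String × String) i =>
        (st.1 ++ ["#define REVERSE_" ++ PySem.Int.toStr i ++ "(" ++
            (if st.2.1 == "" then "x" ++ PySem.Int.toStr (i - 1)
             else st.2.1 ++ "," ++ ("x" ++ PySem.Int.toStr (i - 1))) ++ ")" ++
            (if st.2.2 == "" then "x" ++ PySem.Int.toStr (i - 1)
             else "x" ++ PySem.Int.toStr (i - 1) ++ "," ++ st.2.2)],
         (if st.2.1 == "" then "x" ++ PySem.Int.toStr (i - 1)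
          else st.2.1 ++ "," ++ ("x" ++ PySem.Int.toStr (i - 1))),
         (if st.2.2 == "" then "x" ++ PySem.Int.toStr (i - 1)
          else "x" ++ PySem.Int.toStr (i - 1) ++ "," ++ st.2.2)))
      (["#define REVERSE_0(...)"], "", "")
    = ((PySem.List.pyRange 1 ((k : Int) + 1) 1).foldl
        (fun lines i =>
          lines ++ ["#define REVERSE_" ++ PySem.Int.toStr i ++ "(" ++ pvParams i ++ ")" ++ pvRevp i])
        ["#define REVERSE_0(...)"],
       pvParams (k : Int), pvRevp (k : Int)) := by
  induction k with
  | zero =>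
    rw [show ((0 : Nat) : Int) + 1 = 1 by norm_num, PySem.List.pyRange_one_eq_nil (by norm_num)]
    decide
  | succ k ih =>
    have hcast : (((k + 1 : Nat)) : Int) + 1 = ((k : Int) + 1) + 1 := by push_cast; ring
    rw [hcast, PySem.List.pyRange_one_succ_right (by omega), List.foldl_append,
      List.foldl_append, ih]
    simp only [List.foldl_cons, List.foldl_nil]
    have hsub : ((k : Int) + 1) - 1 = (k : Int) := by ring
    rw [hsub]
    rcases Nat.eq_zero_or_pos k with hk | hk
    · subst hk
      decide
    · rw [pvParams_ne k hk, pvRevp_ne k hk]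
      simp only [Bool.false_eq_true, if_false]
      rw [show ("x" ++ PySem.Int.toStr (k : Int)) = pvTok (k : Int) from rfl,
        ← pvParams_succ k hk, ← pvRevp_succ k hk]
      simp only [Nat.cast_add, Nat.cast_one]

theorem generate_reverse_spec : Claim_equal_generate_reverse := by
  intro n _
  show generate_reverse n = generate_reverse_alt n
  by_cases hn : 0 ≤ n
  case neg =>
    have h1 : PySem.List.pyRange 1 (n + 1) 1 = [] := PySem.List.pyRange_one_eq_nil (by omega)
    simp only [generate_reverse, generate_reverse_alt, h1, List.foldl_nil]
  case pos =>
    have h := pvInv n.toNat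
    rw [Int.toNat_of_nonneg hn] at h
    simp only [pvParams, pvRevp] at h
    simp only [generate_reverse, generate_reverse_alt,
      show (fun j => "x" ++ PySem.Int.toStr j) = pvTok from rfl]
    rw [h]
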